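-- pv_equiv track=rewrite | github.com/6210qwe/leetcode_py | leetcode_solutions/by_id/q0555.py | split_concatenated_strings
-- ===== SOURCE A (Python) =====
-- from typing import List, Optional
--
-- def split_concatenated_strings(s: str, words: List[str]) -> List[str]:
--     """
--     函数式接口 - 实现分割连接字符串
--     """
--     # 初始化前缀字典
--     prefixes = {word[:i] for word in words for i in range(1, len(word) + 1)}
--
--     result = []
--     current = ""
--
--     for char in s:
--         current += char
--         if current in prefixes and (len(current) == 1 or current[:-1] not in prefixes):
--             result.append(current)
--             current = ""
--
--     return result
-- ===== SOURCE B (Python) =====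
-- def split_concatenated_strings(s, words):
--     # The prefix set of A is closed under taking prefixes, so A's append
--     # condition can only fire on one-character segments: the result is the
--     # chars of s taken while each is the first letter of some word.
--     firsts = set()
--     for w in words:
--         if w:
--             firsts.add(w[0])
--     result = []
--     for ch in s:
--         if ch not in firsts:
--             break
--         result.append(ch)
--     return result
-- ===== Notes on version B (the rewrite author's own statement) =====
-- stated objective: faster
-- what changed: B drops the all-prefixes set and the accumulator loop entirely: since A's prefix set is prefix-closed its append condition only fires on 1-char segments, so B just collects first letters of the words and take-whiles s over that set, stopping at the first miss.
import Mathlib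
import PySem

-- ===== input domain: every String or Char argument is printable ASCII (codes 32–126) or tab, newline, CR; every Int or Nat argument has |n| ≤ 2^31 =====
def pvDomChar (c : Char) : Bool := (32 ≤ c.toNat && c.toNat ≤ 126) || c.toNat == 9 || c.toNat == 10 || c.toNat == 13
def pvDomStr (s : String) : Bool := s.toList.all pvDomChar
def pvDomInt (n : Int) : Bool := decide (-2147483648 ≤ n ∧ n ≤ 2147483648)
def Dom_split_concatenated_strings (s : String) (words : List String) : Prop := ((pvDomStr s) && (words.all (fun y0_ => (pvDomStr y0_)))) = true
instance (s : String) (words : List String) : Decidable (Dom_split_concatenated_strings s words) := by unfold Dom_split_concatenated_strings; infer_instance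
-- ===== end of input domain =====

-- B replaces A's all-prefixes set and accumulator loop by a take-while over the words' first letters
-- (equal because A's prefix set is prefix-closed); a timing run measures the speed-up.

-- ===== PORT A =====
-- prefixes = {word[:i] for word in words for i in range(1, len(word) + 1)}  (strings modeled as List Char)
def pvPrefixes (words : List String) : PySem.Set (List Char) :=
  PySem.Set.ofList (words.flatMap (fun word =>
    (PySem.List.pyRange 1 ((word.toList.length : Int) + 1) 1).map
      (fun i => PySem.List.slice word.toList none (some i))))

-- the body of A's for-loop: state = (result, current)
def pvStepA (prefixes : PySem.Set (List Char)) (st : List String × List Char) (char : Char) :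
    List String × List Char :=
  -- current = st.2 ++ [char]; written inline (no let) for the proofs below
  if PySem.Set.contains prefixes (st.2 ++ [char]) &&
     ((st.2 ++ [char]).length == 1 ||
       ! PySem.Set.contains prefixes (PySem.List.slice (st.2 ++ [char]) none (some (-1))))
  then (st.1 ++ [String.ofList (st.2 ++ [char])], [])
  else (st.1, st.2 ++ [char])

def split_concatenated_strings (s : String) (words : List String) : List String :=
  (s.toList.foldl (pvStepA (pvPrefixes words)) ([], [])).1

-- ===== PORT B =====
-- firsts = set of first characters of the nonempty words
def pvFirsts (words : List String) : PySem.Set Char :=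
  words.foldl (fun fs w =>
    match w.toList with
    | [] => fs
    | c :: _ => PySem.Set.add fs c) PySem.Set.empty

-- the loop with break: take chars while they are in firsts
def pvTakeB (firsts : PySem.Set Char) : List Char → List String
  | [] => []
  | c :: rest =>
      if PySem.Set.contains firsts c then String.ofList [c] :: pvTakeB firsts rest else []

def split_concatenated_strings_alt (s : String) (words : List String) : List String :=
  pvTakeB (pvFirsts words) s.toList

-- ===== PRECONDITION & SPEC =====
def Spec_split_concatenated_strings (s : String) (words : List String) (out : List String) : Prop := out = split_concatenated_strings_alt s words
instance (s : String) (words : List String) (out : List String) : Decidable (Spec_split_concatenated_strings s words out) := by unfold Spec_split_concatenated_strings; infer_instance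

-- ===== CLAIM (what is proved, stated in full; the proofs are below) =====
def Claim_equal_split_concatenated_strings : Prop := ∀ (s : String) (words : List String), Dom_split_concatenated_strings s words → Spec_split_concatenated_strings s words (split_concatenated_strings s words)

-- ===== LEMMAS AND PROOFS =====

-- equation lemmas for pvTakeB
lemma pvTakeB_nil (f : PySem.Set Char) : pvTakeB f [] = [] := rfl
lemma pvTakeB_cons (f : PySem.Set Char) (c : Char) (rest : List Char) :
    pvTakeB f (c :: rest) =
      if PySem.Set.contains f c then String.ofList [c] :: pvTakeB f rest else [] := rfl

-- membership in A's prefix set: the nonempty prefixes of the words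
lemma mem_pvPrefixes (words : List String) (cur : List Char) :
    cur ∈ pvPrefixes words ↔ cur ≠ [] ∧ ∃ w ∈ words, cur <+: w.toList := by
  unfold pvPrefixes
  rw [PySem.Set.mem_ofList]
  simp only [List.mem_flatMap, List.mem_map]
  constructor
  · rintro ⟨w, hw, i, hi, rfl⟩
    rw [PySem.List.mem_pyRange_one] at hi
    obtain ⟨h1, h2⟩ := hi
    rw [PySem.List.slice_to w.toList (by omega : (0:Int) ≤ i)]
    refine ⟨?_, w, hw, List.take_prefix _ _⟩
    intro h
    have := congrArg List.length h
    simp only [List.length_take, List.length_nil] at this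
    omega
  · rintro ⟨hne, w, hw, hpre⟩
    refine ⟨w, hw, (cur.length : Int), ?_, ?_⟩
    · rw [PySem.List.mem_pyRange_one]
      have h1 : 0 < cur.length := List.length_pos_of_ne_nil hne
      have h2 : cur.length ≤ w.toList.length := hpre.length_le
      omega
    · rw [PySem.List.slice_to_natCast]
      exact (List.prefix_iff_eq_take.mp hpre).symm

-- membership in B's first-letter set
lemma mem_pvFirsts (words : List String) (c : Char) :
    c ∈ pvFirsts words ↔ ∃ w ∈ words, ∃ rest, w.toList = c :: rest := by
  unfold pvFirsts
  suffices h : ∀ (acc : PySem.Set Char), c ∈ words.foldl (fun fs w =>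
      match w.toList with
      | [] => fs
      | c :: _ => PySem.Set.add fs c) acc ↔ c ∈ acc ∨ ∃ w ∈ words, ∃ rest, w.toList = c :: rest by
    simpa [PySem.Set.empty] using h PySem.Set.empty
  induction words with
  | nil => simp
  | cons w ws ih =>
    intro acc
    simp only [List.foldl_cons, List.mem_cons]
    rw [ih]
    cases hw : w.toList with
    | nil =>
      constructor
      · rintro (h | ⟨v, hv, r, hr⟩)
        · exact Or.inl h
        · exact Or.inr ⟨v, Or.inr hv, r, hr⟩
      · rintro (h | ⟨v, hv | hv, r, hr⟩)
        · exact Or.inl h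
        · subst hv; rw [hw] at hr; cases hr
        · exact Or.inr ⟨v, hv, r, hr⟩
    | cons c0 rest0 =>
      simp only [PySem.Set.mem_add]
      constructor
      · rintro (⟨h | rfl⟩ | ⟨v, hv, r, hr⟩)
        · exact Or.inl h
        · exact Or.inr ⟨w, Or.inl rfl, rest0, hw⟩
        · exact Or.inr ⟨v, Or.inr hv, r, hr⟩
      · rintro (h | ⟨v, hv | hv, r, hr⟩)
        · exact Or.inl (Or.inl h)
        · subst hv; rw [hw] at hr; injection hr with h1 _; exact Or.inl (Or.inr h1.symm)
        · exact Or.inr ⟨v, hv, r, hr⟩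

-- the single-character test of A agrees with B's first-letter test
lemma contains_single (words : List String) (c : Char) :
    PySem.Set.contains (pvPrefixes words) [c] = PySem.Set.contains (pvFirsts words) c := by
  rw [Bool.eq_iff_iff, PySem.Set.contains_iff, PySem.Set.contains_iff,
    mem_pvPrefixes, mem_pvFirsts]
  constructor
  · rintro ⟨-, w, hw, hpre⟩
    obtain ⟨t, ht⟩ := hpre
    exact ⟨w, hw, t, ht.symm⟩
  · rintro ⟨w, hw, rest, hr⟩
    exact ⟨by simp, w, hw, ⟨rest, hr.symm⟩⟩

-- prefix-closure: if cur ++ [c] is in the prefix set and cur ≠ [], so is cur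
lemma pvPrefixes_closed (words : List String) (cur : List Char) (c : Char)
    (hne : cur ≠ []) (h : (cur ++ [c]) ∈ pvPrefixes words) : cur ∈ pvPrefixes words := by
  rw [mem_pvPrefixes] at h ⊢
  obtain ⟨-, w, hw, hpre⟩ := h
  exact ⟨hne, w, hw, (List.prefix_append cur [c]).trans hpre⟩

-- once current is nonempty, A's loop never appends again
lemma foldl_stepA_stuck (words : List String) (chars : List Char) :
    ∀ (res : List String) (cur : List Char), cur ≠ [] →
      (chars.foldl (pvStepA (pvPrefixes words)) (res, cur)).1 = res := by
  induction chars with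
  | nil => intro res cur _; rfl
  | cons c rest ih =>
    intro res cur hne
    have hlen : ((cur ++ [c]).length == 1) = false := by
      have := List.length_pos_of_ne_nil hne
      simp only [List.length_append, List.length_cons, List.length_nil, beq_eq_false_iff_ne]
      omega
    have hcond : (PySem.Set.contains (pvPrefixes words) (cur ++ [c]) &&
        ((cur ++ [c]).length == 1 ||
          ! PySem.Set.contains (pvPrefixes words) (PySem.List.slice (cur ++ [c]) none (some (-1))))) = false := by
      rw [PySem.List.slice_to_neg_one, List.dropLast_concat]
      cases hmem : PySem.Set.contains (pvPrefixes words) (cur ++ [c]) with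
      | false => rfl
      | true =>
        have hcur : PySem.Set.contains (pvPrefixes words) cur = true := by
          rw [PySem.Set.contains_iff] at hmem ⊢
          exact pvPrefixes_closed words cur c hne hmem
        rw [hcur, hlen]
        rfl
    simp only [List.foldl_cons]
    have hstep : pvStepA (pvPrefixes words) (res, cur) c = (res, cur ++ [c]) := by
      simp only [pvStepA]
      rw [hcond]
      simp
    rw [hstep]
    exact ih res (cur ++ [c]) (by simp)

-- from an empty current, A's loop computes B's take-while
lemma foldl_stepA_empty (words : List String) (chars : List Char) :
    ∀ (res : List String),
      (chars.foldl (pvStepA (pvPrefixes words)) (res, [])).1 =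
        res ++ pvTakeB (pvFirsts words) chars := by
  induction chars with
  | nil => intro res; simp [pvTakeB_nil]
  | cons c rest ih =>
    intro res
    simp only [List.foldl_cons]
    have hcond : (PySem.Set.contains (pvPrefixes words) (([] : List Char) ++ [c]) &&
        ((([] : List Char) ++ [c]).length == 1 ||
          ! PySem.Set.contains (pvPrefixes words) (PySem.List.slice (([] : List Char) ++ [c]) none (some (-1))))) =
        PySem.Set.contains (pvFirsts words) c := by
      rw [List.nil_append, contains_single]
      cases PySem.Set.contains (pvFirsts words) c <;> rfl
    cases hc : PySem.Set.contains (pvFirsts words) c with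
    | true =>
      have hstep : pvStepA (pvPrefixes words) (res, []) c = (res ++ [String.ofList [c]], []) := by
        simp only [pvStepA]
        rw [hcond, hc]
        simp
      rw [hstep, ih, pvTakeB_cons, hc]
      simp
    | false =>
      have hstep : pvStepA (pvPrefixes words) (res, []) c = (res, [] ++ [c]) := by
        simp only [pvStepA]
        rw [hcond, hc]
        simp
      rw [hstep, List.nil_append, foldl_stepA_stuck words rest res [c] (by simp),
        pvTakeB_cons, hc]
      simp

-- ===== VERDICT (by name: the statement is the Claim_ definition above) =====
theorem split_concatenated_strings_spec : Claim_equal_split_concatenated_strings := by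
  intro s words _
  unfold Spec_split_concatenated_strings split_concatenated_strings split_concatenated_strings_alt
  rw [foldl_stepA_empty]
  simp
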